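-- pv_equiv track=rewrite | github.com/ousmane234/Programmation_python | programme.py | replace_last
-- ===== SOURCE A (Python) =====
-- def replace_last(string , element= ""):
-- 		chaine = list()
-- 		for i in range(len(string)):
-- 			if i == len(string)-1:
-- 				chaine.append(element)
-- 				break
-- 			chaine.append(string[i])
--
-- 		return "".join(chaine)
-- ===== SOURCE B (Python) =====
-- def replace_last(string, element=""):
--     if not string:
--         return ""
--     return string[:-1] + element
-- ===== Notes on version B (the rewrite author's own statement) =====
-- stated objective: simpler
-- what changed: Replaces the index loop that copies characters one by one into a list and joins them with a single closed-form slice concatenation string[:-1] + element (with an explicit empty-string guard).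
import Mathlib
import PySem

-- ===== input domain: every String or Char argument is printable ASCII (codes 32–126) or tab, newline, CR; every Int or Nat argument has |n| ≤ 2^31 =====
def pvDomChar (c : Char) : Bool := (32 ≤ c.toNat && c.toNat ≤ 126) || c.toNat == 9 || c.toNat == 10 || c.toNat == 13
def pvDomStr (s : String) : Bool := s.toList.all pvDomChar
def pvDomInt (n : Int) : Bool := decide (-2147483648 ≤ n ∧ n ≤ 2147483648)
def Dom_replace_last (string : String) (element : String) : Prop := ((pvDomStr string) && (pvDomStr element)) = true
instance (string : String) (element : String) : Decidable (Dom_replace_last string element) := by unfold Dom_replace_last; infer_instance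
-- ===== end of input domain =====

-- B replaces A's character-copying index loop + join with the closed form string[:-1] + element (objective: simpler).

-- ===== PORT A =====
-- A's for-loop over range(len(string)) with a break; `chaine` is the accumulator list.
-- string[i] is ported with Str.pyGet?; in A's loop i is always in range, so the none branch is unreachable.
def replaceLastLoopA (string : String) (element : String) : List Int → List String → List String
  | [], chaine => chaine
  | i :: rest, chaine =>
    if i = PySem.Str.len string - 1 then chaine ++ [element]   -- append element, then break
    else replaceLastLoopA string element rest
      (chaine ++ [match PySem.Str.pyGet? string i with | some c => String.ofList [c] | none => ""])

def replace_last (string : String) (element : String) : String :=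
  PySem.Str.join "" (replaceLastLoopA string element (PySem.List.pyRange 0 (PySem.Str.len string) 1) [])

-- ===== PORT B =====
def replace_last_alt (string : String) (element : String) : String :=
  if string = "" then "" else PySem.Str.slice string none (some (-1)) ++ element

-- ===== PRECONDITION & SPEC =====
def Spec_replace_last (string : String) (element : String) (out : String) : Prop := out = replace_last_alt string element
instance (string : String) (element : String) (out : String) : Decidable (Spec_replace_last string element out) := by unfold Spec_replace_last; infer_instance

-- ===== CLAIM (what is proved, stated in full; the proofs are below) =====
def Claim_equal_replace_last : Prop := ∀ (string : String) (element : String), Dom_replace_last string element → Spec_replace_last string element (replace_last string element)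

-- ===== LEMMAS AND PROOFS =====

-- joining with the empty separator flattens the pieces
theorem join_empty_flatten (parts : List (List Char)) :
    PySem.Chars.join [] parts = parts.flatten := by
  induction parts with
  | nil => simp [PySem.Chars.join_nil]
  | cons p rest ih =>
    cases rest with
    | nil => simp [PySem.Chars.join_singleton]
    | cons q r => rw [PySem.Chars.join_cons_cons]; simp_all

-- flattening singleton lists is the identity
theorem flatten_map_singleton {α : Type} (l : List α) :
    (l.map (fun x => [x])).flatten = l := by
  induction l with
  | nil => rfl
  | cons a r ih => simp [ih]

-- invariant of A's loop: starting at index k < len, it appends one singleton string per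
-- character of (drop k).dropLast and then the element
theorem loopA_eq (string element : String) :
    ∀ (m k : Nat) (acc : List String), m = string.toList.length - k → k < string.toList.length →
    replaceLastLoopA string element (PySem.List.pyRange (k : Int) (PySem.Str.len string) 1) acc
      = acc ++ ((string.toList.drop k).dropLast.map (fun c => String.ofList [c])) ++ [element] := by
  intro m
  induction m with
  | zero => intro k acc hm hk; omega
  | succ m ih =>
    intro k acc hm hk
    have hlen : PySem.Str.len string = (string.toList.length : Int) := by
      simp [PySem.Str.len_eq]
    have hklt : (k : Int) < PySem.Str.len string := by rw [hlen]; exact_mod_cast hk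
    rw [PySem.List.pyRange_one_cons hklt]
    by_cases hlast : k = string.toList.length - 1
    · have : (k : Int) = PySem.Str.len string - 1 := by rw [hlen]; omega
      simp only [replaceLastLoopA, this]
      have hdrop : (string.toList.drop k).dropLast = [] := by
        have h1 : (string.toList.drop k).length = string.toList.length - k :=
          List.length_drop
        have h2 : (string.toList.drop k).dropLast.length = (string.toList.drop k).length - 1 :=
          List.length_dropLast
        exact List.eq_nil_of_length_eq_zero (by omega)
      simp [hdrop]
    · have hne : ¬ ((k : Int) = PySem.Str.len string - 1) := by rw [hlen]; omega
      have hk1 : k + 1 < string.toList.length := by omega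
      simp only [replaceLastLoopA, if_neg hne]
      have hget : PySem.Str.pyGet? string (k : Int) = some (string.toList[k]'hk) := by
        simp [List.getElem?_eq_getElem hk]
      rw [hget]
      have : ((k : Int) + 1) = ((k + 1 : Nat) : Int) := by push_cast; ring
      rw [this, ih (k + 1) _ (by omega) hk1]
      have hdrop : string.toList.drop k = string.toList[k]'hk :: string.toList.drop (k + 1) :=
        List.drop_eq_getElem_cons hk
      have hnenil : string.toList.drop (k + 1) ≠ [] := by
        intro hc
        rw [List.drop_eq_nil_iff] at hc
        omega
      rw [hdrop, List.dropLast_cons_of_ne_nil hnenil]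
      simp

-- ===== VERDICT (by name: the statement is the Claim_ definition above) =====
theorem replace_last_spec : Claim_equal_replace_last := by
  intro string element _
  unfold Spec_replace_last replace_last replace_last_alt
  by_cases h : string = ""
  · subst h
    apply String.toList_injective
    have hr : PySem.List.pyRange 0 (PySem.Str.len "") 1 = [] := by decide
    rw [hr]
    simp [replaceLastLoopA, PySem.Str.toList_join, PySem.Chars.join_nil]
  · have hne : string.toList ≠ [] := by
      intro hc; exact h (String.toList_injective (by simp [hc]))
    have hlen : 0 < string.toList.length := List.length_pos_of_ne_nil hne
    rw [if_neg h]
    apply String.toList_injective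
    have h0 : ((0 : Nat) : Int) = (0 : Int) := rfl
    rw [← h0, loopA_eq string element (string.toList.length) 0 [] (by omega) hlen]
    rw [PySem.Str.toList_join]
    have hnil : "".toList = ([] : List Char) := rfl
    rw [hnil, join_empty_flatten]
    have hm : (fun x => (String.ofList [x]).toList) = (fun x => [x] : Char → List Char) := by funext x; simp
    simp [PySem.List.slice_to_neg_one, Function.comp_def, hm, ← List.map_dropLast,
      flatten_map_singleton]
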